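-- pv_equiv track=rewrite | github.com/betooxx-dev/cei-analizador-sintactico-descendente | tokenizer.py | _is_in_string_or_comment
-- ===== SOURCE A (Python) =====
-- def _is_in_string_or_comment(text, pos):
--     """Determina si una posición en el texto está dentro de un string o comentario"""
--     in_string = False
--     string_start = -1
--
--     for i in range(pos):
--         if text[i] == '"' and (i == 0 or text[i-1] != '\\'):
--             if not in_string:
--                 in_string = True
--                 string_start = i
--             else:
--                 in_string = False
--
--         if i < pos - 1 and text[i:i+2] == '//' and not in_string:
--             line_text = text[i:pos]
--             if '\n' not in line_text:
--                 return True
--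
--         if i < pos - 1 and text[i:i+2] == '/*' and not in_string:
--             comment_text = text[i:pos]
--             if '*/' not in comment_text:
--                 return True
--
--     return in_string
-- ===== SOURCE B (Python) =====
-- def _is_in_string_or_comment(text, pos):
--     """Single left-to-right pass: track string state plus whether a line
--     comment ('//' with no newline since) or a block comment ('/*' with no
--     '*/' since) is still open at pos; no slice copies."""
--     in_string = False
--     line_open = False
--     block_open = False
--     n = min(pos, len(text))
--     for i in range(n):
--         c = text[i]
--         if c == '"':
--             if i == 0 or text[i - 1] != '\\':
--                 in_string = not in_string
--         elif c == '\n':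
--             line_open = False
--         elif i + 1 < pos and i + 1 < len(text):
--             nxt = text[i + 1]
--             if c == '/' and nxt == '/' and not in_string:
--                 line_open = True
--             elif c == '/' and nxt == '*' and not in_string:
--                 block_open = True
--             elif c == '*' and nxt == '/':
--                 block_open = False
--     return line_open or block_open or in_string
-- ===== Notes on version B (the rewrite author's own statement) =====
-- stated objective: alternative
-- what changed: A rescans a slice text[i:pos] (searching for '\n' or '*/') at every candidate '//' or '/*'; B makes one left-to-right pass keeping three booleans (in_string, line-comment-open, block-comment-open), resetting them at '\n' and '*/', so no slice is ever built or searched.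
-- outside the precondition, e.g. on _is_in_string_or_comment('//', 5): A returns True, B returns True; on _is_in_string_or_comment('abc', 5): A raises IndexError, B returns False
import Mathlib
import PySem

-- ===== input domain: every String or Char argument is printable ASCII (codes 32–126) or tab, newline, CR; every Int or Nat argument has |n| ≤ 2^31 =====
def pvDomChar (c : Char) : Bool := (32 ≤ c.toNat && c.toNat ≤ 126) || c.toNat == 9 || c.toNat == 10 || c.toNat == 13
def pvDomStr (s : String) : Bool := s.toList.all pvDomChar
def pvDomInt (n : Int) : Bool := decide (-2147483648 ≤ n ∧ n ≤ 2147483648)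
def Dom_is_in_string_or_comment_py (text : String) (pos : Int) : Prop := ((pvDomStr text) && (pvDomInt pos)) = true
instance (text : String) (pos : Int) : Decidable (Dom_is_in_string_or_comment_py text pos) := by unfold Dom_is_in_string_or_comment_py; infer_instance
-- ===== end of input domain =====

-- B replaces A's rescanning (a slice text[i:pos] built and searched at every candidate '//' or '/*')
-- by ONE left-to-right pass keeping three booleans; objective: alternative (no slices, single pass).

-- ===== PORT A =====
-- literal port of A's loop: i is the loop index, fuel = pos - i iterations remain;
-- text[i] is PySem.List.pyGetD (exact under Pre_, where every scanned index is in range)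
def pvAux_aLoop (cs : List Char) (pos : Int) (inStr : Bool) (strStart : Int) (i fuel : Nat) : Bool :=
  match fuel with
  | 0 => inStr
  | fuel' + 1 =>
    let c := PySem.List.pyGetD cs (i : Int) ' '
    let p : Bool × Int :=
      if c = '"' ∧ (i = 0 ∨ PySem.List.pyGetD cs ((i : Int) - 1) ' ' ≠ '\\') then
        (if inStr = false then (true, (i : Int)) else (false, strStart))
      else (inStr, strStart)
    if (i : Int) < pos - 1 ∧
        PySem.List.slice cs (some (i : Int)) (some ((i : Int) + 2)) = ['/', '/'] ∧
        p.1 = false ∧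
        PySem.Chars.isIn ['\n'] (PySem.List.slice cs (some (i : Int)) (some pos)) = false then
      true
    else if (i : Int) < pos - 1 ∧
        PySem.List.slice cs (some (i : Int)) (some ((i : Int) + 2)) = ['/', '*'] ∧
        p.1 = false ∧
        PySem.Chars.isIn ['*', '/'] (PySem.List.slice cs (some (i : Int)) (some pos)) = false then
      true
    else pvAux_aLoop cs pos p.1 p.2 (i + 1) fuel'

def is_in_string_or_comment_py (text : String) (pos : Int) : Bool :=
  pvAux_aLoop text.toList pos false (-1) 0 pos.toNat

-- ===== PORT B =====
-- literal port of B's single pass: state (inStr, lineOpen, blockOpen), n = min(pos, len(text)) iterations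
def pvAux_bLoop (cs : List Char) (pos : Int) (inStr lineOpen blockOpen : Bool) (i fuel : Nat) : Bool :=
  match fuel with
  | 0 => lineOpen || blockOpen || inStr
  | fuel' + 1 =>
    let c := cs.getD i ' '
    if c = '"' then
      let inStr' := if i = 0 ∨ cs.getD (i - 1) ' ' ≠ '\\' then !inStr else inStr
      pvAux_bLoop cs pos inStr' lineOpen blockOpen (i + 1) fuel'
    else if c = '\n' then
      pvAux_bLoop cs pos inStr false blockOpen (i + 1) fuel'
    else if (i : Int) + 1 < pos ∧ i + 1 < cs.length then
      let nxt := cs.getD (i + 1) ' '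
      if c = '/' ∧ nxt = '/' ∧ inStr = false then
        pvAux_bLoop cs pos inStr true blockOpen (i + 1) fuel'
      else if c = '/' ∧ nxt = '*' ∧ inStr = false then
        pvAux_bLoop cs pos inStr lineOpen true (i + 1) fuel'
      else if c = '*' ∧ nxt = '/' then
        pvAux_bLoop cs pos inStr lineOpen false (i + 1) fuel'
      else
        pvAux_bLoop cs pos inStr lineOpen blockOpen (i + 1) fuel'
    else
      pvAux_bLoop cs pos inStr lineOpen blockOpen (i + 1) fuel'

def is_in_string_or_comment_py_alt (text : String) (pos : Int) : Bool :=
  pvAux_bLoop text.toList pos false false false 0 (min pos.toNat text.toList.length)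

-- ===== PRECONDITION & SPEC =====
-- Pre_ excludes pos > len(text): there A's text[i] raises IndexError once the scan reaches the end
-- of the text (on the few such inputs where A early-returns True before that, B returns True as well).
def Pre_is_in_string_or_comment_py (text : String) (pos : Int) : Prop :=
  pos ≤ (text.toList.length : Int)
instance (text : String) (pos : Int) : Decidable (Pre_is_in_string_or_comment_py text pos) := by
  unfold Pre_is_in_string_or_comment_py; infer_instance

def pvWitness_is_in_string_or_comment_py : String × Int := ("// x", 3)

def Spec_is_in_string_or_comment_py (text : String) (pos : Int) (out : Bool) : Prop := out = is_in_string_or_comment_py_alt text pos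
instance (text : String) (pos : Int) (out : Bool) : Decidable (Spec_is_in_string_or_comment_py text pos out) := by unfold Spec_is_in_string_or_comment_py; infer_instance

-- ===== CLAIM (what is proved, stated in full; the proofs are below) =====
def Claim_equal_is_in_string_or_comment_py : Prop := ∀ (text : String) (pos : Int), Dom_is_in_string_or_comment_py text pos → Pre_is_in_string_or_comment_py text pos → Spec_is_in_string_or_comment_py text pos (is_in_string_or_comment_py text pos)

-- ===== LEMMAS AND PROOFS =====

lemma pv_keep_line (cs : List Char) (pos : Int) :
    ∀ fuel i (s b : Bool), (∀ k, i ≤ k → k < i + fuel → cs.getD k ' ' ≠ '\n') →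
      pvAux_bLoop cs pos s true b i fuel = true := by
  intro fuel
  induction fuel with
  | zero => intro i s b _; simp [pvAux_bLoop]
  | succ f ih =>
    intro i s b h
    have hne : cs.getD i ' ' ≠ '\n' := h i (le_refl _) (by omega)
    have h' : ∀ k, i + 1 ≤ k → k < (i + 1) + f → cs.getD k ' ' ≠ '\n' :=
      fun k hk1 hk2 => h k (by omega) (by omega)
    simp only [pvAux_bLoop]
    split_ifs <;> first | exact ih _ _ _ h' | exact absurd ‹cs.getD i ' ' = '\n'› hne

lemma pv_keep_block (cs : List Char) (pos : Int) :
    ∀ fuel i (s l : Bool),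
      (∀ k : Nat, i ≤ k → k < i + fuel → ¬((k : Int) + 1 < pos ∧ k + 1 < cs.length ∧ cs.getD k ' ' = '*' ∧ cs.getD (k + 1) ' ' = '/')) →
      pvAux_bLoop cs pos s l true i fuel = true := by
  intro fuel
  induction fuel with
  | zero => intro i s l _; simp [pvAux_bLoop]
  | succ f ih =>
    intro i s l h
    have hi := h i (le_refl _) (by omega)
    have h' : ∀ k : Nat, i + 1 ≤ k → k < (i + 1) + f → ¬((k : Int) + 1 < pos ∧ k + 1 < cs.length ∧ cs.getD k ' ' = '*' ∧ cs.getD (k + 1) ' ' = '/') :=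
      fun k hk1 hk2 => h k (by omega) (by omega)
    simp only [pvAux_bLoop]
    split_ifs <;>
      first
        | exact ih _ _ _ h'
        | (have hg : (i : Int) + 1 < pos ∧ i + 1 < cs.length := ‹_›
           have hc : cs.getD i ' ' = '*' ∧ cs.getD (i + 1) ' ' = '/' := ‹_›
           exact absurd ⟨hg.1, hg.2, hc.1, hc.2⟩ hi)

lemma pv_drop_line (cs : List Char) (pos : Int) :
    ∀ fuel i (s b : Bool), (∃ k, i ≤ k ∧ k < i + fuel ∧ cs.getD k ' ' = '\n') →
      pvAux_bLoop cs pos s true b i fuel = pvAux_bLoop cs pos s false b i fuel := by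
  intro fuel
  induction fuel with
  | zero => intro i s b h; obtain ⟨k, h1, h2, _⟩ := h; omega
  | succ f ih =>
    intro i s b h
    obtain ⟨k, hik, hkf, hk⟩ := h
    simp only [pvAux_bLoop]
    split_ifs <;>
      first
        | rfl
        | (have hcn : ¬ cs.getD i ' ' = '\n' := ‹_›
           have hki : k ≠ i := fun e => hcn (e ▸ hk)
           exact ih _ _ _ ⟨k, by omega, by omega, hk⟩)
        | (have hq : cs.getD i ' ' = '"' := ‹_›
           have hki : k ≠ i := fun e => by rw [e, hq] at hk; exact absurd hk (by decide)
           exact ih _ _ _ ⟨k, by omega, by omega, hk⟩)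


lemma pv_drop_block (cs : List Char) (pos : Int) :
    ∀ fuel i (s l : Bool),
      (∃ k : Nat, i ≤ k ∧ k < i + fuel ∧ ((k : Int) + 1 < pos ∧ k + 1 < cs.length ∧ cs.getD k ' ' = '*' ∧ cs.getD (k + 1) ' ' = '/')) →
      pvAux_bLoop cs pos s l true i fuel = pvAux_bLoop cs pos s l false i fuel := by
  intro fuel
  induction fuel with
  | zero => intro i s l h; obtain ⟨k, h1, h2, _⟩ := h; omega
  | succ f ih =>
    intro i s l h
    obtain ⟨k, hik, hkf, hkP⟩ := h
    simp only [pvAux_bLoop]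
    split_ifs with hq ht hn hg hl hb hr
    · have hki : k ≠ i := fun e => by
        rw [e, hq] at hkP; exact absurd hkP.2.2.1 (by decide)
      exact ih _ _ _ ⟨k, by omega, by omega, hkP⟩
    · have hki : k ≠ i := fun e => by
        rw [e, hq] at hkP; exact absurd hkP.2.2.1 (by decide)
      exact ih _ _ _ ⟨k, by omega, by omega, hkP⟩
    · have hki : k ≠ i := fun e => by
        rw [e, hn] at hkP; exact absurd hkP.2.2.1 (by decide)
      exact ih _ _ _ ⟨k, by omega, by omega, hkP⟩
    · have hki : k ≠ i := fun e => by
        rw [e, hl.1] at hkP; exact absurd hkP.2.2.1 (by decide)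
      exact ih _ _ _ ⟨k, by omega, by omega, hkP⟩
    · rfl
    · rfl
    · have hki : k ≠ i := fun e => by
        rw [e] at hkP; exact hr ⟨hkP.2.2.1, hkP.2.2.2⟩
      exact ih _ _ _ ⟨k, by omega, by omega, hkP⟩
    · have hki : k ≠ i := fun e => by
        rw [e] at hkP; exact hg ⟨hkP.1, hkP.2.1⟩
      exact ih _ _ _ ⟨k, by omega, by omega, hkP⟩

lemma pv_slice_two (cs : List Char) (i : Nat) (h : i + 1 < cs.length) :
    PySem.List.slice cs (some (i : Int)) (some ((i : Int) + 2)) = [cs.getD i ' ', cs.getD (i + 1) ' '] := by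
  have h2 : ((i : Int) + 2) = (((i + 2 : Nat) : Int)) := by push_cast; ring
  rw [h2, PySem.List.slice_natCast]
  have : i + 2 - i = 2 := by omega
  rw [this, List.getD_eq_getElem cs ' ' (show i < cs.length by omega), List.getD_eq_getElem cs ' ' h,
    List.drop_eq_getElem_cons (show i < cs.length by omega),
    List.drop_eq_getElem_cons (show i + 1 < cs.length from h)]
  rfl

lemma pv_window_char (cs : List Char) (n i : Nat) (hn : n ≤ cs.length) (c : Char) :
    PySem.Chars.isIn [c] (PySem.List.slice cs (some (i : Int)) (some (n : Int))) = false ↔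
    ∀ k, i ≤ k → k < n → cs.getD k ' ' ≠ c := by
  rw [PySem.List.slice_natCast, PySem.Chars.isIn_eq_false_iff, List.singleton_infix_iff]
  constructor
  · intro hnm k hik hkn hc
    apply hnm
    rw [List.mem_iff_getElem]
    refine ⟨k - i, ?_, ?_⟩
    · simp [List.length_take, List.length_drop]; omega
    · rw [List.getElem_take, List.getElem_drop]
      rw [List.getD_eq_getElem cs ' ' (by omega)] at hc
      simp only [show i + (k - i) = k by omega]; exact hc
  · intro hall hm
    rw [List.mem_iff_getElem] at hm
    obtain ⟨j, hj, hje⟩ := hm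
    simp only [List.length_take, List.length_drop] at hj
    rw [List.getElem_take, List.getElem_drop] at hje
    exact hall (i + j) (by omega) (by omega) (by rw [List.getD_eq_getElem cs ' ' (by omega)]; exact hje) 

lemma pv_window_pair (cs : List Char) (n i : Nat) (hn : n ≤ cs.length) (a b : Char) :
    PySem.Chars.isIn [a, b] (PySem.List.slice cs (some (i : Int)) (some (n : Int))) = false ↔
    ∀ k, i ≤ k → k + 1 < n → ¬(cs.getD k ' ' = a ∧ cs.getD (k + 1) ' ' = b) := by
  rw [PySem.List.slice_natCast]
  have hiff : PySem.Chars.isIn [a, b] ((cs.drop i).take (n - i)) = true ↔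
      ∃ k, i ≤ k ∧ k + 1 < n ∧ cs.getD k ' ' = a ∧ cs.getD (k + 1) ' ' = b := by
    rw [← PySem.Chars.exists_prefix_drop_iff_isIn]
    constructor
    · rintro ⟨j, t, ht⟩
      rw [List.drop_take, List.drop_drop] at ht
      have hlen := congrArg List.length ht
      simp only [List.length_append, List.length_cons, List.length_take, List.length_drop,
        List.length_nil] at hlen
      have h2 : i + j + 1 < n := by omega
      have e0 : cs[i + j]? = some a := by
        have h0 : ((cs.drop (i + j)).take (n - i - j))[0]? = some a := by rw [← ht]; rfl
        rwa [List.getElem?_take_of_lt (by omega), List.getElem?_drop] at h0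
      have e1 : cs[i + j + 1]? = some b := by
        have h1 : ((cs.drop (i + j)).take (n - i - j))[1]? = some b := by rw [← ht]; rfl
        rwa [List.getElem?_take_of_lt (by omega), List.getElem?_drop] at h1
      refine ⟨i + j, by omega, h2, ?_, ?_⟩
      · rw [List.getD_eq_getElem cs ' ' (by omega)]
        rw [List.getElem?_eq_getElem (by omega)] at e0; exact Option.some.inj e0
      · rw [List.getD_eq_getElem cs ' ' (by omega)]
        rw [List.getElem?_eq_getElem (by omega)] at e1; exact Option.some.inj e1
    · rintro ⟨k, hik, hkn, ha, hb⟩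
      refine ⟨k - i, ?_⟩
      rw [List.drop_take, List.drop_drop]
      rw [List.getD_eq_getElem cs ' ' (by omega)] at ha
      rw [List.getD_eq_getElem cs ' ' (by omega)] at hb
      have hik' : i + (k - i) = k := by omega
      rw [hik']
      have hsplit : n - i - (k - i) = (n - k - 2) + 1 + 1 := by omega
      rw [hsplit, List.drop_eq_getElem_cons (show k < cs.length by omega), List.take_succ_cons,
        List.drop_eq_getElem_cons (show k + 1 < cs.length by omega), List.take_succ_cons, ha, hb]
      exact ⟨_, rfl⟩
  constructor
  · intro hf k hik hkn hab
    rw [← Bool.not_eq_true, hiff] at hf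
    exact hf ⟨k, hik, hkn, hab.1, hab.2⟩
  · intro hall
    rw [← Bool.not_eq_true, hiff]
    rintro ⟨k, hik, hkn, ha, hb⟩
    exact hall k hik hkn ⟨ha, hb⟩

lemma pv_main (cs : List Char) (n : Nat) (hn : n ≤ cs.length) :
    ∀ fuel i (s : Bool) (ss : Int), i + fuel = n →
      pvAux_aLoop cs (n : Int) s ss i fuel = pvAux_bLoop cs (n : Int) s false false i fuel := by
  intro fuel
  induction fuel with
  | zero => intro i s ss _; simp [pvAux_aLoop, pvAux_bLoop]
  | succ f ih =>
    intro i s ss hif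
    have hi : i < n := by omega
    have hilen : i < cs.length := by omega
    simp only [pvAux_aLoop, pvAux_bLoop, PySem.List.pyGetD_natCast]
    by_cases hq : cs.getD i ' ' = '"'
    · -- '"' : no comment can start here; only the string state toggles
      have hD : (cs.getD i ' ' = '"' ∧ (i = 0 ∨ PySem.List.pyGetD cs ((i : Int) - 1) ' ' ≠ '\\')) ↔
          (i = 0 ∨ cs.getD (i - 1) ' ' ≠ '\\') := by
        rcases Nat.eq_zero_or_pos i with h0 | hpos
        · subst h0
          exact ⟨fun _ => Or.inl rfl, fun _ => ⟨hq, Or.inl rfl⟩⟩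
        · have hc1 : ((i : Int) - 1) = ((i - 1 : Nat) : Int) := by omega
          rw [hc1, PySem.List.pyGetD_natCast]
          exact ⟨fun h => h.2, fun h => ⟨hq, h⟩⟩
      have hf1 : ¬((i : Int) < (n : Int) - 1 ∧
          PySem.List.slice cs (some (i : Int)) (some ((i : Int) + 2)) = ['/', '/'] ∧
          (if cs.getD i ' ' = '"' ∧ (i = 0 ∨ PySem.List.pyGetD cs ((i : Int) - 1) ' ' ≠ '\\') then
              if s = false then (true, (i : Int)) else (false, ss) else (s, ss)).1 = false ∧
          PySem.Chars.isIn ['\n'] (PySem.List.slice cs (some (i : Int)) (some (n : Int))) = false) := by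
        rintro ⟨h1, h2, -, -⟩
        rw [pv_slice_two cs i (by omega)] at h2
        rw [hq] at h2
        injection h2 with e1 e2; exact absurd e1 (by decide)
      have hf2 : ¬((i : Int) < (n : Int) - 1 ∧
          PySem.List.slice cs (some (i : Int)) (some ((i : Int) + 2)) = ['/', '*'] ∧
          (if cs.getD i ' ' = '"' ∧ (i = 0 ∨ PySem.List.pyGetD cs ((i : Int) - 1) ' ' ≠ '\\') then
              if s = false then (true, (i : Int)) else (false, ss) else (s, ss)).1 = false ∧
          PySem.Chars.isIn ['*', '/'] (PySem.List.slice cs (some (i : Int)) (some (n : Int))) = false) := by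
        rintro ⟨h1, h2, -, -⟩
        rw [pv_slice_two cs i (by omega)] at h2
        rw [hq] at h2
        injection h2 with e1 e2; exact absurd e1 (by decide)
      rw [if_neg hf1, if_neg hf2, if_pos hq]
      by_cases hd : i = 0 ∨ cs.getD (i - 1) ' ' ≠ '\\'
      · rw [if_pos (hD.mpr hd), if_pos hd]
        cases s
        · simpa using ih (i + 1) true (i : Int) (by omega)
        · simpa using ih (i + 1) false ss (by omega)
      · rw [if_neg (fun h => hd (hD.mp h)), if_neg hd]
        exact ih (i + 1) s ss (by omega)
    · -- c ≠ '"': the string state is unchanged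
      have hpn : ¬(cs.getD i ' ' = '"' ∧ (i = 0 ∨ PySem.List.pyGetD cs ((i : Int) - 1) ' ' ≠ '\\')) :=
        fun h => hq h.1
      rw [if_neg hpn, if_neg hq]
      by_cases hnl : cs.getD i ' ' = '\n'
      · have hf1 : ¬((i : Int) < (n : Int) - 1 ∧
            PySem.List.slice cs (some (i : Int)) (some ((i : Int) + 2)) = ['/', '/'] ∧
            ((s, ss) : Bool × Int).1 = false ∧
            PySem.Chars.isIn ['\n'] (PySem.List.slice cs (some (i : Int)) (some (n : Int))) = false) := by
          rintro ⟨h1, h2, -, -⟩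
          rw [pv_slice_two cs i (by omega)] at h2
          rw [hnl] at h2
          injection h2 with e1 e2; exact absurd e1 (by decide)
        have hf2 : ¬((i : Int) < (n : Int) - 1 ∧
            PySem.List.slice cs (some (i : Int)) (some ((i : Int) + 2)) = ['/', '*'] ∧
            ((s, ss) : Bool × Int).1 = false ∧
            PySem.Chars.isIn ['*', '/'] (PySem.List.slice cs (some (i : Int)) (some (n : Int))) = false) := by
          rintro ⟨h1, h2, -, -⟩
          rw [pv_slice_two cs i (by omega)] at h2
          rw [hnl] at h2
          injection h2 with e1 e2; exact absurd e1 (by decide)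
        rw [if_neg hf1, if_neg hf2, if_pos hnl]
        exact ih (i + 1) s ss (by omega)
      · rw [if_neg hnl]
        by_cases hg : i + 1 < n
        · have hglen : i + 1 < cs.length := by omega
          rw [if_pos (⟨by omega, hglen⟩ : ((i : Int) + 1 < (n : Int) ∧ i + 1 < cs.length)),
            pv_slice_two cs i hglen]
          by_cases hl : cs.getD i ' ' = '/' ∧ cs.getD (i + 1) ' ' = '/' ∧ s = false
          · rw [if_pos hl]
            by_cases hwin : PySem.Chars.isIn ['\n'] (PySem.List.slice cs (some (i : Int)) (some (n : Int))) = false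
            · rw [if_pos (⟨by omega, by rw [hl.1, hl.2.1], hl.2.2, hwin⟩ : _ ∧ _ ∧ _ ∧ _)]
              exact (pv_keep_line cs (n : Int) f (i + 1) s false
                (fun k hk1 hk2 => (pv_window_char cs n i hn '\n').mp hwin k (by omega) (by omega))).symm
            · have hf1 : ¬((i : Int) < (n : Int) - 1 ∧
                  [cs.getD i ' ', cs.getD (i + 1) ' '] = ['/', '/'] ∧
                  ((s, ss) : Bool × Int).1 = false ∧
                  PySem.Chars.isIn ['\n'] (PySem.List.slice cs (some (i : Int)) (some (n : Int))) = false) :=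
                fun h => hwin h.2.2.2
              have hf2 : ¬((i : Int) < (n : Int) - 1 ∧
                  [cs.getD i ' ', cs.getD (i + 1) ' '] = ['/', '*'] ∧
                  ((s, ss) : Bool × Int).1 = false ∧
                  PySem.Chars.isIn ['*', '/'] (PySem.List.slice cs (some (i : Int)) (some (n : Int))) = false) := by
                rintro ⟨-, h2, -, -⟩
                rw [hl.1, hl.2.1] at h2; exact absurd h2 (by decide)
              rw [if_neg hf1, if_neg hf2]
              have hex : ∃ k, i ≤ k ∧ k < n ∧ cs.getD k ' ' = '\n' := by
                by_contra hc
                push_neg at hc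
                exact hwin ((pv_window_char cs n i hn '\n').mpr fun k hk1 hk2 => hc k hk1 hk2)
              obtain ⟨k, hk1, hk2, hk3⟩ := hex
              have hki : k ≠ i := fun e => by rw [e, hl.1] at hk3; exact absurd hk3 (by decide)
              rw [pv_drop_line cs (n : Int) f (i + 1) s false ⟨k, by omega, by omega, hk3⟩]
              exact ih (i + 1) s ss (by omega)
          · rw [if_neg hl]
            by_cases hb : cs.getD i ' ' = '/' ∧ cs.getD (i + 1) ' ' = '*' ∧ s = false
            · rw [if_pos hb]
              have hf1 : ¬((i : Int) < (n : Int) - 1 ∧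
                  [cs.getD i ' ', cs.getD (i + 1) ' '] = ['/', '/'] ∧
                  ((s, ss) : Bool × Int).1 = false ∧
                  PySem.Chars.isIn ['\n'] (PySem.List.slice cs (some (i : Int)) (some (n : Int))) = false) := by
                rintro ⟨-, h2, -, -⟩
                rw [hb.1, hb.2.1] at h2; exact absurd h2 (by decide)
              rw [if_neg hf1]
              by_cases hwin : PySem.Chars.isIn ['*', '/'] (PySem.List.slice cs (some (i : Int)) (some (n : Int))) = false
              · rw [if_pos (⟨by omega, by rw [hb.1, hb.2.1], hb.2.2, hwin⟩ : _ ∧ _ ∧ _ ∧ _)]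
                refine (pv_keep_block cs (n : Int) f (i + 1) s false (fun k hk1 hk2 hkP => ?_)).symm
                have hkn : k + 1 < n := by omega
                exact (pv_window_pair cs n i hn '*' '/').mp hwin k (by omega) hkn ⟨hkP.2.2.1, hkP.2.2.2⟩
              · have hf2 : ¬((i : Int) < (n : Int) - 1 ∧
                    [cs.getD i ' ', cs.getD (i + 1) ' '] = ['/', '*'] ∧
                    ((s, ss) : Bool × Int).1 = false ∧
                    PySem.Chars.isIn ['*', '/'] (PySem.List.slice cs (some (i : Int)) (some (n : Int))) = false) :=
                  fun h => hwin h.2.2.2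
                rw [if_neg hf2]
                have hex : ∃ k, i ≤ k ∧ k + 1 < n ∧ cs.getD k ' ' = '*' ∧ cs.getD (k + 1) ' ' = '/' := by
                  by_contra hc
                  push_neg at hc
                  exact hwin ((pv_window_pair cs n i hn '*' '/').mpr
                    fun k hk1 hk2 hkp => hc k hk1 hk2 hkp.1 hkp.2)
                obtain ⟨k, hk1, hk2, hk3, hk4⟩ := hex
                have hki : k ≠ i := fun e => by rw [e, hb.1] at hk3; exact absurd hk3 (by decide)
                rw [pv_drop_block cs (n : Int) f (i + 1) s false
                  ⟨k, by omega, by omega, by omega, by omega, hk3, hk4⟩]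
                exact ih (i + 1) s ss (by omega)
            · rw [if_neg hb]
              have hf1 : ¬((i : Int) < (n : Int) - 1 ∧
                  [cs.getD i ' ', cs.getD (i + 1) ' '] = ['/', '/'] ∧
                  ((s, ss) : Bool × Int).1 = false ∧
                  PySem.Chars.isIn ['\n'] (PySem.List.slice cs (some (i : Int)) (some (n : Int))) = false) := by
                rintro ⟨-, h2, h3, -⟩
                obtain ⟨e1, e2⟩ : cs.getD i ' ' = '/' ∧ cs.getD (i + 1) ' ' = '/' := by simpa using h2
                exact hl ⟨e1, e2, h3⟩
              have hf2 : ¬((i : Int) < (n : Int) - 1 ∧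
                  [cs.getD i ' ', cs.getD (i + 1) ' '] = ['/', '*'] ∧
                  ((s, ss) : Bool × Int).1 = false ∧
                  PySem.Chars.isIn ['*', '/'] (PySem.List.slice cs (some (i : Int)) (some (n : Int))) = false) := by
                rintro ⟨-, h2, h3, -⟩
                obtain ⟨e1, e2⟩ : cs.getD i ' ' = '/' ∧ cs.getD (i + 1) ' ' = '*' := by simpa using h2
                exact hb ⟨e1, e2, h3⟩
              rw [if_neg hf1, if_neg hf2]
              by_cases hr : cs.getD i ' ' = '*' ∧ cs.getD (i + 1) ' ' = '/'
              · rw [if_pos hr]; exact ih (i + 1) s ss (by omega)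
              · rw [if_neg hr]; exact ih (i + 1) s ss (by omega)
        · have hf1 : ¬((i : Int) < (n : Int) - 1 ∧
              PySem.List.slice cs (some (i : Int)) (some ((i : Int) + 2)) = ['/', '/'] ∧
              ((s, ss) : Bool × Int).1 = false ∧
              PySem.Chars.isIn ['\n'] (PySem.List.slice cs (some (i : Int)) (some (n : Int))) = false) :=
            fun h => hg (by have := h.1; omega)
          have hf2 : ¬((i : Int) < (n : Int) - 1 ∧
              PySem.List.slice cs (some (i : Int)) (some ((i : Int) + 2)) = ['/', '*'] ∧
              ((s, ss) : Bool × Int).1 = false ∧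
              PySem.Chars.isIn ['*', '/'] (PySem.List.slice cs (some (i : Int)) (some (n : Int))) = false) :=
            fun h => hg (by have := h.1; omega)
          have hBg : ¬((i : Int) + 1 < (n : Int) ∧ i + 1 < cs.length) :=
            fun h => hg (by have := h.1; omega)
          rw [if_neg hf1, if_neg hf2, if_neg hBg]
          exact ih (i + 1) s ss (by omega)

-- ===== VERDICT (by name: the statement is the Claim_ definition above) =====
theorem is_in_string_or_comment_py_spec : Claim_equal_is_in_string_or_comment_py := by
  intro text pos _hdom hpre
  unfold Spec_is_in_string_or_comment_py is_in_string_or_comment_py is_in_string_or_comment_py_alt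
  rcases (by omega : pos ≤ 0 ∨ 0 < pos) with hle | hpos
  · have h0 : pos.toNat = 0 := Int.toNat_of_nonpos hle
    simp [h0, pvAux_aLoop, pvAux_bLoop]
  · have hn : pos = ((pos.toNat : Nat) : Int) := (Int.toNat_of_nonneg (le_of_lt hpos)).symm
    have hlen : pos.toNat ≤ text.toList.length := by
      unfold Pre_is_in_string_or_comment_py at hpre; omega
    rw [hn]
    simp only [Int.toNat_natCast, Nat.min_eq_left hlen]
    exact pv_main text.toList pos.toNat hlen pos.toNat 0 false (-1) (by omega)
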